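-- pv_equiv track=rewrite | github.com/alfielytorres/algorithms-data-structures | introductory/week 3/workshop03_code/test.py | addition_table
-- ===== SOURCE A (Python) =====
-- import copy
--
-- def addition_table(numbers):
--
--     '''
--     Input: addition_table([2, 5, -3, 7])
--     Output: [[3, 6, -2, 8], [4, 7, -1, 9], [5, 8, 0, 10]]
--     '''
--
--     outer_list = [None,None,None]
--
--     for i in range(0,len(outer_list)):
--         outer_list[i] = copy.deepcopy(numbers)
--
--
--     for i in range(0,len(outer_list)):
--         for j in range(0, len(outer_list[i])):
--             outer_list[i][j] = outer_list[i][j]+(i+1)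
--     return outer_list
-- ===== SOURCE B (Python) =====
-- def addition_table(numbers):
--     rows = []
--     current = numbers
--     for _ in range(3):
--         current = [x + 1 for x in current]
--         rows.append(current)
--     return rows
-- ===== Notes on version B (the rewrite author's own statement) =====
-- stated objective: simpler
-- what changed: Each row is derived cumulatively from the previous row by adding 1 elementwise, instead of deep-copying the input three times and adding i+1 to each copy via index loops.
import Mathlib
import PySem

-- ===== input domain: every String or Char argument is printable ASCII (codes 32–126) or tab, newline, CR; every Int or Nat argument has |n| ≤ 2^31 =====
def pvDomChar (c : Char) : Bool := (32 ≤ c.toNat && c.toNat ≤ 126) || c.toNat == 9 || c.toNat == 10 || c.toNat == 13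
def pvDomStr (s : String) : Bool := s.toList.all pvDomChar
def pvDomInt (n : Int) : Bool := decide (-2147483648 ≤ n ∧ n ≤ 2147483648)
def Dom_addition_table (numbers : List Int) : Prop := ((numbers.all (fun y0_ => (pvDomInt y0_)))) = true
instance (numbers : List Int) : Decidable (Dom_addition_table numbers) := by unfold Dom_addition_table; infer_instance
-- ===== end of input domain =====

-- B derives each row cumulatively from the previous one instead of adding i+1 to three deep copies of the input (objective: simpler).

-- ===== PORT A =====
-- outer_list = [None,None,None]; then each slot is replaced by a copy of numbers, so we
-- initialise with empty rows (the None placeholders are never read) and set each slot.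
def addition_table (numbers : List Int) : List (List Int) :=
  (PySem.List.pyRange 0
      (Int.ofNat ((PySem.List.pyRange 0 (Int.ofNat ([([] : List Int), [], []]).length) 1).foldl
        (fun acc i => acc.set i.toNat numbers) [([] : List Int), [], []]).length) 1).foldl
    (fun acc i =>
      acc.set i.toNat
        ((PySem.List.pyRange 0 (Int.ofNat (acc.getD i.toNat []).length) 1).foldl
          (fun r j => r.set j.toNat (r.getD j.toNat 0 + (i + 1)))
          (acc.getD i.toNat [])))
    ((PySem.List.pyRange 0 (Int.ofNat ([([] : List Int), [], []]).length) 1).foldl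
      (fun acc i => acc.set i.toNat numbers) [([] : List Int), [], []])

-- ===== PORT B =====
def addition_table_alt (numbers : List Int) : List (List Int) :=
  ((List.range 3).foldl
    (fun (st : List (List Int) × List Int) _ =>
      (st.1 ++ [st.2.map (· + 1)], st.2.map (· + 1)))
    ([], numbers)).1

-- ===== PRECONDITION & SPEC =====
def Spec_addition_table (numbers : List Int) (out : List (List Int)) : Prop := out = addition_table_alt numbers
instance (numbers : List Int) (out : List (List Int)) : Decidable (Spec_addition_table numbers out) := by unfold Spec_addition_table; infer_instance

-- ===== CLAIM (what is proved, stated in full; the proofs are below) =====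
def Claim_equal_addition_table : Prop := ∀ (numbers : List Int), Dom_addition_table numbers → Spec_addition_table numbers (addition_table numbers)

-- ===== LEMMAS AND PROOFS =====

-- A's inner index loop over a row adds c to every element: it equals a map.
theorem foldl_set_add (c : Int) : ∀ (xs ys : List Int),
    (PySem.List.pyRange (Int.ofNat ys.length) (Int.ofNat (ys.length + xs.length)) 1).foldl
      (fun r j => r.set j.toNat (r.getD j.toNat 0 + c)) (ys ++ xs)
    = ys ++ xs.map (· + c) := by
  intro xs
  induction xs with
  | nil =>
    intro ys
    simp
  | cons x xs ih =>
    intro ys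
    have hlt : (Int.ofNat ys.length) < Int.ofNat (ys.length + (x :: xs).length) := by
      simp
    rw [PySem.List.pyRange_one_cons hlt]
    simp only [List.foldl_cons]
    have hget : (ys ++ x :: xs).getD (Int.ofNat ys.length).toNat 0 = x := by
      simp [List.getD]
    have hset : (ys ++ x :: xs).set (Int.ofNat ys.length).toNat (x + c)
        = (ys ++ [x + c]) ++ xs := by
      simp [List.set_append_right]
    rw [hget, hset]
    have hih := ih (ys ++ [x + c])
    simp only [List.length_append, List.length_cons, List.length_nil, Nat.zero_add] at hih ⊢
    have harg : (Int.ofNat ys.length) + 1 = Int.ofNat (ys.length + 1) := by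
      simp
    rw [harg, show ys.length + (xs.length + 1) = ys.length + 1 + xs.length by omega, hih]
    simp

theorem foldl_set_add_zero (c : Int) (xs : List Int) :
    (PySem.List.pyRange 0 (Int.ofNat xs.length) 1).foldl
      (fun r j => r.set j.toNat (r.getD j.toNat 0 + c)) xs
    = xs.map (· + c) := by
  have := foldl_set_add c xs []
  simpa using this

-- the same statement in the getElem?-normal form produced by simp/norm_num
theorem foldl_set_add_zero' (c : Int) (xs : List Int) :
    (PySem.List.pyRange 0 ((xs.length : Int)) 1).foldl
      (fun r j => r.set j.toNat (r[j.toNat]?.getD 0 + c)) xs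
    = xs.map (· + c) := by
  have := foldl_set_add_zero c xs
  simpa [List.getD] using this

theorem map_add_add (a b : Int) (xs : List Int) :
    (xs.map (· + a)).map (· + b) = xs.map (· + (a + b)) := by
  simp [List.map_map]

-- ===== VERDICT (by name: the statement is the Claim_ definition above) =====
theorem addition_table_spec : Claim_equal_addition_table := by
  intro numbers _
  unfold Spec_addition_table addition_table addition_table_alt
  rw [show PySem.List.pyRange 0 (Int.ofNat ([([] : List Int), [], []]).length) 1 = [0, 1, 2]
        by decide]
  simp only [List.foldl_cons, List.foldl_nil]
  norm_num [List.set, List.getD]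
  rw [show [numbers, numbers, ([] : List Int)].set (Int.toNat 2) numbers
        = [numbers, numbers, numbers] from rfl]
  rw [show PySem.List.pyRange 0 3 1 = [0, 1, 2] by decide]
  simp only [List.foldl_cons, List.foldl_nil]
  simp only [List.getElem?_cons_zero, List.getElem?_cons_succ, Option.getD_some,
    Int.toNat_zero, Int.toNat_one, List.set]
  norm_num [foldl_set_add_zero', map_add_add]
  simp [List.range_succ, Int.toNat]
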